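-- pv_equiv track=rewrite | github.com/JashanJain/LYA_CHATBOT | main2.py | normalize_query
-- ===== SOURCE A (Python) =====
-- def normalize_query(text):
--     replacements = {
--         "infra fact": "infra pack",
--         "infra park": "infra pack",
--         "infra back": "infra pack",
--     }
--     text = text.lower()
--     for wrong, correct in replacements.items():
--         text = text.replace(wrong, correct)
--     return text
-- ===== SOURCE B (Python) =====
-- def normalize_query(text):
--     text = text.lower()
--     out = []
--     i = 0
--     n = len(text)
--     while i < n:
--         if text.startswith(("infra fact", "infra park", "infra back"), i):
--             out.append("infra pack")
--             i += 10
--         else: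
--             out.append(text[i])
--             i += 1
--     return "".join(out)
-- ===== Notes on version B (the rewrite author's own statement) =====
-- stated objective: alternative
-- what changed: B replaces A's three sequential full-string .replace passes (one per dict entry) with a single left-to-right scan that matches any of the three typo patterns in one pass.
import Mathlib
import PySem

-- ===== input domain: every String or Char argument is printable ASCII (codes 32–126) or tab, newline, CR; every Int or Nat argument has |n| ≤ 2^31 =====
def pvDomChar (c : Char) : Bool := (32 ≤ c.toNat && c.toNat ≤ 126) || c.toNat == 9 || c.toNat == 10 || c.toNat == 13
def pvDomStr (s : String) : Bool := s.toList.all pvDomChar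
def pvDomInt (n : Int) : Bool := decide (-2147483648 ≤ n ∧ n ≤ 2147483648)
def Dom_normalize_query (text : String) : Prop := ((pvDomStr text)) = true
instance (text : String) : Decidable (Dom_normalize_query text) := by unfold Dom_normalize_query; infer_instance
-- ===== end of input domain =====

-- B replaces A's three sequential full-string .replace passes with a single left-to-right
-- scan matching any of the three typo patterns in one pass (objective: alternative).

-- ===== PORT A =====
def normalize_query (text : String) : String :=
  let replacements : PySem.Dict String String :=
    (((PySem.Dict.empty).insert "infra fact" "infra pack").insert "infra park" "infra pack").insert "infra back" "infra pack"
  let text := PySem.Str.lower text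
  let text := replacements.items.foldl (fun t p => PySem.Str.replace t p.1 p.2) text
  text

-- ===== PORT B =====
-- the while-loop of Source B: at each index either one of the three patterns starts (emit
-- "infra pack", advance 10) or the current char is copied (advance 1); the final
-- "".join(out) is the concatenation built here
def pvScanB : List Char → List Char
  | [] => []
  | c :: t =>
    if "infra fact".toList.isPrefixOf (c :: t) ∨ "infra park".toList.isPrefixOf (c :: t)
        ∨ "infra back".toList.isPrefixOf (c :: t) then
      "infra pack".toList ++ pvScanB (t.drop 9)
    else
      c :: pvScanB t
termination_by cs => cs.length
decreasing_by all_goals simp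

def normalize_query_alt (text : String) : String :=
  String.ofList (pvScanB (PySem.Chars.lower text.toList))

-- ===== PRECONDITION & SPEC =====
def Spec_normalize_query (text : String) (out : String) : Prop := out = normalize_query_alt text
instance (text : String) (out : String) : Decidable (Spec_normalize_query text out) := by unfold Spec_normalize_query; infer_instance

-- ===== CLAIM (what is proved, stated in full; the proofs are below) =====
def Claim_equal_normalize_query : Prop := ∀ (text : String), Dom_normalize_query text → Spec_normalize_query text (normalize_query text)

-- ===== LEMMAS AND PROOFS =====

-- single-pattern left-to-right replace scan (the loop inside Python's str.replace)
def pvScan1 (old new : List Char) : List Char → List Char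
  | [] => []
  | c :: t =>
    if old.isPrefixOf (c :: t) then new ++ pvScan1 old new (t.drop (old.length - 1))
    else c :: pvScan1 old new t
termination_by cs => cs.length
decreasing_by all_goals simp

lemma pvGo_eq_scan1 (old new : List Char) (hold : old ≠ []) :
    ∀ (fuel : Nat) (l acc : List Char), l.length ≤ fuel →
      PySem.Chars.replace.go old new fuel l acc = acc.reverse ++ pvScan1 old new l := by
  intro fuel
  induction fuel with
  | zero =>
    intro l acc h
    have : l = [] := List.eq_nil_of_length_eq_zero (Nat.le_zero.mp h)
    subst this
    simp [PySem.Chars.replace.go, pvScan1]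
  | succ n ih =>
    intro l acc h
    match l with
    | [] => simp [PySem.Chars.replace.go, pvScan1]
    | c :: t =>
      rw [PySem.Chars.replace.go]
      by_cases hp : old.isPrefixOf (c :: t)
      · rw [if_pos hp, pvScan1, if_pos hp]
        have hone : 1 ≤ old.length := List.length_pos_iff.mpr hold
        have hlen : ((c :: t).drop old.length).length ≤ n := by
          simp at h ⊢
          omega
        rw [ih _ _ hlen]
        have hdrop : (c :: t).drop old.length = t.drop (old.length - 1) := by
          rw [show old.length = (old.length - 1) + 1 by omega]
          simp
        rw [hdrop]
        simp
      · rw [if_neg hp, pvScan1, if_neg hp]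
        have hlen : t.length ≤ n := by simp at h; omega
        rw [ih _ _ hlen]
        simp

lemma pvReplace_eq_scan1 (s old new : List Char) (hold : old ≠ []) :
    PySem.Chars.replace s old new = pvScan1 old new s := by
  rw [PySem.Chars.replace]
  rw [if_neg (by simp [hold])]
  rw [pvGo_eq_scan1 old new hold s.length s [] (le_refl _)]
  simp

-- skipping lemmas: the scan for one pattern walks straight through an occurrence of a
-- DIFFERENT pattern (or of the replacement), since no other pattern starts inside it
lemma pvSkip_fact_park (X : List Char) :
    pvScan1 "infra fact".toList "infra pack".toList ("infra park".toList ++ X)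
      = "infra park".toList ++ pvScan1 "infra fact".toList "infra pack".toList X := by
  have e : "infra park".toList = ['i','n','f','r','a',' ','p','a','r','k'] := rfl
  rw [e]
  simp only [List.cons_append, List.nil_append]
  rw [pvScan1, if_neg (fun h => Bool.noConfusion h),
      pvScan1, if_neg (fun h => Bool.noConfusion h),
      pvScan1, if_neg (fun h => Bool.noConfusion h),
      pvScan1, if_neg (fun h => Bool.noConfusion h),
      pvScan1, if_neg (fun h => Bool.noConfusion h),
      pvScan1, if_neg (fun h => Bool.noConfusion h),
      pvScan1, if_neg (fun h => Bool.noConfusion h),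
      pvScan1, if_neg (fun h => Bool.noConfusion h),
      pvScan1, if_neg (fun h => Bool.noConfusion h),
      pvScan1, if_neg (fun h => Bool.noConfusion h)]

lemma pvSkip_fact_back (X : List Char) :
    pvScan1 "infra fact".toList "infra pack".toList ("infra back".toList ++ X)
      = "infra back".toList ++ pvScan1 "infra fact".toList "infra pack".toList X := by
  have e : "infra back".toList = ['i','n','f','r','a',' ','b','a','c','k'] := rfl
  rw [e]
  simp only [List.cons_append, List.nil_append]
  rw [pvScan1, if_neg (fun h => Bool.noConfusion h),
      pvScan1, if_neg (fun h => Bool.noConfusion h),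
      pvScan1, if_neg (fun h => Bool.noConfusion h),
      pvScan1, if_neg (fun h => Bool.noConfusion h),
      pvScan1, if_neg (fun h => Bool.noConfusion h),
      pvScan1, if_neg (fun h => Bool.noConfusion h),
      pvScan1, if_neg (fun h => Bool.noConfusion h),
      pvScan1, if_neg (fun h => Bool.noConfusion h),
      pvScan1, if_neg (fun h => Bool.noConfusion h),
      pvScan1, if_neg (fun h => Bool.noConfusion h)]

lemma pvSkip_park_back (X : List Char) :
    pvScan1 "infra park".toList "infra pack".toList ("infra back".toList ++ X)
      = "infra back".toList ++ pvScan1 "infra park".toList "infra pack".toList X := by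
  have e : "infra back".toList = ['i','n','f','r','a',' ','b','a','c','k'] := rfl
  rw [e]
  simp only [List.cons_append, List.nil_append]
  rw [pvScan1, if_neg (fun h => Bool.noConfusion h),
      pvScan1, if_neg (fun h => Bool.noConfusion h),
      pvScan1, if_neg (fun h => Bool.noConfusion h),
      pvScan1, if_neg (fun h => Bool.noConfusion h),
      pvScan1, if_neg (fun h => Bool.noConfusion h),
      pvScan1, if_neg (fun h => Bool.noConfusion h),
      pvScan1, if_neg (fun h => Bool.noConfusion h),
      pvScan1, if_neg (fun h => Bool.noConfusion h),
      pvScan1, if_neg (fun h => Bool.noConfusion h),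
      pvScan1, if_neg (fun h => Bool.noConfusion h)]

lemma pvSkip_park_pack (X : List Char) :
    pvScan1 "infra park".toList "infra pack".toList ("infra pack".toList ++ X)
      = "infra pack".toList ++ pvScan1 "infra park".toList "infra pack".toList X := by
  have e : "infra pack".toList = ['i','n','f','r','a',' ','p','a','c','k'] := rfl
  rw [e]
  simp only [List.cons_append, List.nil_append]
  rw [pvScan1, if_neg (fun h => Bool.noConfusion h),
      pvScan1, if_neg (fun h => Bool.noConfusion h),
      pvScan1, if_neg (fun h => Bool.noConfusion h),
      pvScan1, if_neg (fun h => Bool.noConfusion h),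
      pvScan1, if_neg (fun h => Bool.noConfusion h),
      pvScan1, if_neg (fun h => Bool.noConfusion h),
      pvScan1, if_neg (fun h => Bool.noConfusion h),
      pvScan1, if_neg (fun h => Bool.noConfusion h),
      pvScan1, if_neg (fun h => Bool.noConfusion h),
      pvScan1, if_neg (fun h => Bool.noConfusion h)]

lemma pvSkip_back_pack (X : List Char) :
    pvScan1 "infra back".toList "infra pack".toList ("infra pack".toList ++ X)
      = "infra pack".toList ++ pvScan1 "infra back".toList "infra pack".toList X := by
  have e : "infra pack".toList = ['i','n','f','r','a',' ','p','a','c','k'] := rfl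
  rw [e]
  simp only [List.cons_append, List.nil_append]
  rw [pvScan1, if_neg (fun h => Bool.noConfusion h),
      pvScan1, if_neg (fun h => Bool.noConfusion h),
      pvScan1, if_neg (fun h => Bool.noConfusion h),
      pvScan1, if_neg (fun h => Bool.noConfusion h),
      pvScan1, if_neg (fun h => Bool.noConfusion h),
      pvScan1, if_neg (fun h => Bool.noConfusion h),
      pvScan1, if_neg (fun h => Bool.noConfusion h),
      pvScan1, if_neg (fun h => Bool.noConfusion h),
      pvScan1, if_neg (fun h => Bool.noConfusion h),
      pvScan1, if_neg (fun h => Bool.noConfusion h)]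

-- a pattern found at its own start is replaced
lemma pvMatch_fact (X : List Char) :
    pvScan1 "infra fact".toList "infra pack".toList ("infra fact".toList ++ X)
      = "infra pack".toList ++ pvScan1 "infra fact".toList "infra pack".toList X := by
  have e : "infra fact".toList = ['i','n','f','r','a',' ','f','a','c','t'] := rfl
  rw [e]
  simp only [List.cons_append, List.nil_append]
  have hp : ['i','n','f','r','a',' ','f','a','c','t'].isPrefixOf ('i'::'n'::'f'::'r'::'a'::' '::'f'::'a'::'c'::'t'::X) = true := rfl
  rw [pvScan1, if_pos hp]
  rw [show (List.drop (['i','n','f','r','a',' ','f','a','c','t'].length - 1) ('n'::'f'::'r'::'a'::' '::'f'::'a'::'c'::'t'::X)) = X from rfl]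

lemma pvMatch_park (X : List Char) :
    pvScan1 "infra park".toList "infra pack".toList ("infra park".toList ++ X)
      = "infra pack".toList ++ pvScan1 "infra park".toList "infra pack".toList X := by
  have e : "infra park".toList = ['i','n','f','r','a',' ','p','a','r','k'] := rfl
  rw [e]
  simp only [List.cons_append, List.nil_append]
  have hp : ['i','n','f','r','a',' ','p','a','r','k'].isPrefixOf ('i'::'n'::'f'::'r'::'a'::' '::'p'::'a'::'r'::'k'::X) = true := rfl
  rw [pvScan1, if_pos hp]
  rw [show (List.drop (['i','n','f','r','a',' ','p','a','r','k'].length - 1) ('n'::'f'::'r'::'a'::' '::'p'::'a'::'r'::'k'::X)) = X from rfl]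

lemma pvMatch_back (X : List Char) :
    pvScan1 "infra back".toList "infra pack".toList ("infra back".toList ++ X)
      = "infra pack".toList ++ pvScan1 "infra back".toList "infra pack".toList X := by
  have e : "infra back".toList = ['i','n','f','r','a',' ','b','a','c','k'] := rfl
  rw [e]
  simp only [List.cons_append, List.nil_append]
  have hp : ['i','n','f','r','a',' ','b','a','c','k'].isPrefixOf ('i'::'n'::'f'::'r'::'a'::' '::'b'::'a'::'c'::'k'::X) = true := rfl
  rw [pvScan1, if_pos hp]
  rw [show (List.drop (['i','n','f','r','a',' ','b','a','c','k'].length - 1) ('n'::'f'::'r'::'a'::' '::'b'::'a'::'c'::'k'::X)) = X from rfl]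

-- the one-pass scan on a string that starts with a pattern
lemma pvScanB_fact (X : List Char) :
    pvScanB ("infra fact".toList ++ X) = "infra pack".toList ++ pvScanB X := by
  have e : "infra fact".toList = ['i','n','f','r','a',' ','f','a','c','t'] := rfl
  rw [e]
  simp only [List.cons_append, List.nil_append]
  have hp : "infra fact".toList.isPrefixOf ('i'::'n'::'f'::'r'::'a'::' '::'f'::'a'::'c'::'t'::X) = true := rfl
  rw [pvScanB, if_pos (Or.inl hp)]
  rw [show (List.drop 9 ('n'::'f'::'r'::'a'::' '::'f'::'a'::'c'::'t'::X)) = X from rfl]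

lemma pvScanB_park (X : List Char) :
    pvScanB ("infra park".toList ++ X) = "infra pack".toList ++ pvScanB X := by
  have e : "infra park".toList = ['i','n','f','r','a',' ','p','a','r','k'] := rfl
  rw [e]
  simp only [List.cons_append, List.nil_append]
  have hp : "infra park".toList.isPrefixOf ('i'::'n'::'f'::'r'::'a'::' '::'p'::'a'::'r'::'k'::X) = true := rfl
  rw [pvScanB, if_pos (Or.inr (Or.inl hp))]
  rw [show (List.drop 9 ('n'::'f'::'r'::'a'::' '::'p'::'a'::'r'::'k'::X)) = X from rfl]

lemma pvScanB_back (X : List Char) :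
    pvScanB ("infra back".toList ++ X) = "infra pack".toList ++ pvScanB X := by
  have e : "infra back".toList = ['i','n','f','r','a',' ','b','a','c','k'] := rfl
  rw [e]
  simp only [List.cons_append, List.nil_append]
  have hp : "infra back".toList.isPrefixOf ('i'::'n'::'f'::'r'::'a'::' '::'b'::'a'::'c'::'k'::X) = true := rfl
  rw [pvScanB, if_pos (Or.inr (Or.inr hp))]
  rw [show (List.drop 9 ('n'::'f'::'r'::'a'::' '::'b'::'a'::'c'::'k'::X)) = X from rfl]

-- a pattern piece with no 'i' found at the front of a scan output was at the front of the input
lemma pvNoI (old : List Char) :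
    ∀ (t q : List Char), 'i' ∉ q →
      q <+: pvScan1 old "infra pack".toList t → q <+: t := by
  intro t
  induction t with
  | nil =>
    intro q hi hq
    rw [pvScan1] at hq
    simpa using hq
  | cons c t' ih =>
    intro q hi hq
    rw [pvScan1] at hq
    by_cases hp : old.isPrefixOf (c :: t')
    · rw [if_pos hp] at hq
      match q with
      | [] => exact List.nil_prefix
      | x :: q' =>
        exfalso
        rw [show ("infra pack".toList ++ pvScan1 old "infra pack".toList (t'.drop (old.length - 1)))
              = 'i' :: ("nfra pack".toList ++ pvScan1 old "infra pack".toList (t'.drop (old.length - 1))) from rfl] at hq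
        have hx : x = 'i' := (List.cons_prefix_cons.mp hq).1
        exact hi (by simp [hx])
    · rw [if_neg hp] at hq
      match q with
      | [] => exact List.nil_prefix
      | x :: q' =>
        obtain ⟨hx, hq'⟩ := List.cons_prefix_cons.mp hq
        have hq't : q' <+: t' := ih q' (fun h => hi (by simp [h])) hq'
        exact List.cons_prefix_cons.mpr ⟨hx, hq't⟩

-- the heart: three sequential single-pattern replaces equal the one-pass scan
lemma pvTriple_eq_scanB :
    ∀ (n : Nat) (cs : List Char), cs.length ≤ n →
      pvScan1 "infra back".toList "infra pack".toList
        (pvScan1 "infra park".toList "infra pack".toList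
          (pvScan1 "infra fact".toList "infra pack".toList cs)) = pvScanB cs := by
  intro n
  induction n with
  | zero =>
    intro cs h
    have : cs = [] := List.eq_nil_of_length_eq_zero (Nat.le_zero.mp h)
    subst this
    simp [pvScan1, pvScanB]
  | succ n ih =>
    intro cs h
    match cs with
    | [] => simp [pvScan1, pvScanB]
    | c :: t =>
      by_cases h1 : "infra fact".toList.isPrefixOf (c :: t) = true
      · obtain ⟨X, hX⟩ := List.isPrefixOf_iff_prefix.mp h1
        have hlen : X.length ≤ n := by
          have := congrArg List.length hX
          simp at this h
          omega
        rw [← hX, pvMatch_fact, pvSkip_park_pack, pvSkip_back_pack, pvScanB_fact, ih X hlen]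
      · by_cases h2 : "infra park".toList.isPrefixOf (c :: t) = true
        · obtain ⟨X, hX⟩ := List.isPrefixOf_iff_prefix.mp h2
          have hlen : X.length ≤ n := by
            have := congrArg List.length hX
            simp at this h
            omega
          rw [← hX, pvSkip_fact_park, pvMatch_park, pvSkip_back_pack, pvScanB_park, ih X hlen]
        · by_cases h3 : "infra back".toList.isPrefixOf (c :: t) = true
          · obtain ⟨X, hX⟩ := List.isPrefixOf_iff_prefix.mp h3
            have hlen : X.length ≤ n := by
              have := congrArg List.length hX
              simp at this h
              omega
            rw [← hX, pvSkip_fact_back, pvSkip_park_back, pvMatch_back, pvScanB_back, ih X hlen]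
          · -- no pattern starts here: all three scans copy c
            have hstep1 : pvScan1 "infra fact".toList "infra pack".toList (c :: t)
                = c :: pvScan1 "infra fact".toList "infra pack".toList t := by
              rw [pvScan1, if_neg h1]
            have h2' : ¬ ("infra park".toList.isPrefixOf
                (c :: pvScan1 "infra fact".toList "infra pack".toList t) = true) := by
              intro hp
              have hpre := List.isPrefixOf_iff_prefix.mp hp
              rw [show "infra park".toList = 'i' :: "nfra park".toList from rfl] at hpre
              obtain ⟨hc, htail⟩ := List.cons_prefix_cons.mp hpre
              have htail' : "nfra park".toList <+: t := pvNoI _ t _ (by decide) htail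
              apply h2
              apply List.isPrefixOf_iff_prefix.mpr
              rw [show "infra park".toList = 'i' :: "nfra park".toList from rfl, hc]
              exact List.cons_prefix_cons.mpr ⟨rfl, htail'⟩
            have hstep2 : pvScan1 "infra park".toList "infra pack".toList
                  (c :: pvScan1 "infra fact".toList "infra pack".toList t)
                = c :: pvScan1 "infra park".toList "infra pack".toList
                    (pvScan1 "infra fact".toList "infra pack".toList t) := by
              rw [pvScan1, if_neg h2']
            have h3' : ¬ ("infra back".toList.isPrefixOf
                (c :: pvScan1 "infra park".toList "infra pack".toList
                  (pvScan1 "infra fact".toList "infra pack".toList t)) = true) := by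
              intro hp
              have hpre := List.isPrefixOf_iff_prefix.mp hp
              rw [show "infra back".toList = 'i' :: "nfra back".toList from rfl] at hpre
              obtain ⟨hc, htail⟩ := List.cons_prefix_cons.mp hpre
              have htail1 : "nfra back".toList <+: pvScan1 "infra fact".toList "infra pack".toList t :=
                pvNoI _ _ _ (by decide) htail
              have htail2 : "nfra back".toList <+: t := pvNoI _ t _ (by decide) htail1
              apply h3
              apply List.isPrefixOf_iff_prefix.mpr
              rw [show "infra back".toList = 'i' :: "nfra back".toList from rfl, hc]
              exact List.cons_prefix_cons.mpr ⟨rfl, htail2⟩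
            have hstep3 : pvScan1 "infra back".toList "infra pack".toList
                  (c :: pvScan1 "infra park".toList "infra pack".toList
                    (pvScan1 "infra fact".toList "infra pack".toList t))
                = c :: pvScan1 "infra back".toList "infra pack".toList
                    (pvScan1 "infra park".toList "infra pack".toList
                      (pvScan1 "infra fact".toList "infra pack".toList t)) := by
              rw [pvScan1, if_neg h3']
            have hnor : ¬ ("infra fact".toList.isPrefixOf (c :: t) = true
                ∨ "infra park".toList.isPrefixOf (c :: t) = true
                ∨ "infra back".toList.isPrefixOf (c :: t) = true) := by
              rintro (h | h | h)
              · exact h1 h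
              · exact h2 h
              · exact h3 h
            have hB : pvScanB (c :: t) = c :: pvScanB t := by
              rw [pvScanB, if_neg hnor]
            rw [hstep1, hstep2, hstep3, hB]
            have hlen : t.length ≤ n := by simp at h; omega
            rw [ih t hlen]

-- ===== VERDICT (by name: the statement is the Claim_ definition above) =====
theorem normalize_query_spec : Claim_equal_normalize_query := by
  intro text _
  unfold Spec_normalize_query
  have hA : normalize_query text
      = PySem.Str.replace (PySem.Str.replace (PySem.Str.replace (PySem.Str.lower text)
          "infra fact" "infra pack") "infra park" "infra pack") "infra back" "infra pack" := rfl
  rw [hA]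
  have hlist : (PySem.Str.replace (PySem.Str.replace (PySem.Str.replace (PySem.Str.lower text)
        "infra fact" "infra pack") "infra park" "infra pack") "infra back" "infra pack").toList
      = pvScanB (PySem.Chars.lower text.toList) := by
    simp only [PySem.Str.toList_replace, PySem.Str.toList_lower]
    rw [pvReplace_eq_scan1 _ _ _ (by decide), pvReplace_eq_scan1 _ _ _ (by decide),
        pvReplace_eq_scan1 _ _ _ (by decide)]
    exact pvTriple_eq_scanB _ _ (le_refl _)
  unfold normalize_query_alt
  rw [← hlist]
  exact String.ofList_toList.symm
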